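-- pv_equiv track=rewrite | github.com/quocmoet195/Practice_Cem6 | main.py | count_damaged_blocks
-- ===== SOURCE A (Python) =====
-- BLOCK_SIZE_BYTES = 16
--
-- def count_damaged_blocks(original_pt, decrypted_pt):
--     """Сравнивает исходный и расшифрованный открытый текст и подсчитывает поврежденные блоки."""
--     damaged_count = 0
--     min_len = min(len(original_pt), len(decrypted_pt))
--     num_blocks = min_len // BLOCK_SIZE_BYTES
--
--     for i in range(num_blocks):
--         start = i * BLOCK_SIZE_BYTES
--         end = start + BLOCK_SIZE_BYTES
--         original_block = original_pt[start:end]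
--         decrypted_block = decrypted_pt[start:end]
--
--         if original_block != decrypted_block:
--             damaged_count += 1
--
--     return damaged_count
-- ===== SOURCE B (Python) =====
-- BLOCK_SIZE_BYTES = 16
--
-- def count_damaged_blocks(original_pt, decrypted_pt):
--     """Byte-level scan: collect the set of block indices containing a differing byte."""
--     limit = (min(len(original_pt), len(decrypted_pt)) // BLOCK_SIZE_BYTES) * BLOCK_SIZE_BYTES
--     damaged = set()
--     for pos in range(limit):
--         if original_pt[pos] != decrypted_pt[pos]:
--             damaged.add(pos // BLOCK_SIZE_BYTES)
--     return len(damaged)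
-- ===== Notes on version B (the rewrite author's own statement) =====
-- stated objective: alternative
-- what changed: Instead of slicing out and comparing whole 16-byte blocks per loop iteration, B scans byte positions 0..limit-1 once and maintains a set of damaged block indices (pos//16), returning the set's size.
import Mathlib
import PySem

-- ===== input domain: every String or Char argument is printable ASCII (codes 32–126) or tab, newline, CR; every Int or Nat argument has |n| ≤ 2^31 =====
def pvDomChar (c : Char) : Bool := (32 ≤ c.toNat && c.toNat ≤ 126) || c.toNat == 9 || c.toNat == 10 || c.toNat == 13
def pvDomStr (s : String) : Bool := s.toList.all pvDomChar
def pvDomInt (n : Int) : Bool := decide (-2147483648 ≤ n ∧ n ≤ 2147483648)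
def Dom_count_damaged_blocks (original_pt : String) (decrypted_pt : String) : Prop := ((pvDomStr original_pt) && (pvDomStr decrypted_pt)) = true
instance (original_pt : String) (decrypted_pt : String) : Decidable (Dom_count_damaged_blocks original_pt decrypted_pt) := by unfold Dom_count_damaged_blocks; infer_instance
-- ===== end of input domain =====

-- B replaces A's per-block slice-and-compare loop by a single byte-level scan that
-- maintains a set of damaged block indices (pos // 16) and returns its size (objective: alternative).

-- ===== PORT A =====
def count_damaged_blocks (original_pt : String) (decrypted_pt : String) : Int :=
  let min_len := min (PySem.Str.len original_pt) (PySem.Str.len decrypted_pt)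
  let num_blocks := PySem.Int.floordiv min_len 16
  (PySem.List.pyRange 0 num_blocks 1).foldl (fun damaged_count i =>
    let start := i * 16
    let stop := start + 16
    let original_block := PySem.Str.slice original_pt (some start) (some stop)
    let decrypted_block := PySem.Str.slice decrypted_pt (some start) (some stop)
    if original_block ≠ decrypted_block then damaged_count + 1 else damaged_count) 0

-- ===== PORT B =====
def count_damaged_blocks_alt (original_pt : String) (decrypted_pt : String) : Int :=
  let limit := (PySem.Int.floordiv (min (PySem.Str.len original_pt) (PySem.Str.len decrypted_pt)) 16) * 16
  let damaged := (PySem.List.pyRange 0 limit 1).foldl (fun s pos =>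
    if PySem.Str.pyGet? original_pt pos ≠ PySem.Str.pyGet? decrypted_pt pos
    then PySem.Set.add s (PySem.Int.floordiv pos 16) else s) PySem.Set.empty
  PySem.Set.len damaged

-- ===== PRECONDITION & SPEC =====
def Spec_count_damaged_blocks (original_pt : String) (decrypted_pt : String) (out : Int) : Prop := out = count_damaged_blocks_alt original_pt decrypted_pt
instance (original_pt : String) (decrypted_pt : String) (out : Int) : Decidable (Spec_count_damaged_blocks original_pt decrypted_pt out) := by unfold Spec_count_damaged_blocks; infer_instance

-- ===== CLAIM (what is proved, stated in full; the proofs are below) =====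
def Claim_equal_count_damaged_blocks : Prop := ∀ (original_pt : String) (decrypted_pt : String), Dom_count_damaged_blocks original_pt decrypted_pt → Spec_count_damaged_blocks original_pt decrypted_pt (count_damaged_blocks original_pt decrypted_pt)

-- ===== LEMMAS AND PROOFS =====

-- B's loop body, named for the proofs (definitionally the lambda in the port of B)
def pvStep (o d : String) : PySem.Set Int → Int → PySem.Set Int := fun s pos =>
  if PySem.Str.pyGet? o pos ≠ PySem.Str.pyGet? d pos
  then PySem.Set.add s (PySem.Int.floordiv pos 16) else s

-- "some byte of block k differs", at the granularity B scans
def pvBlockAny (o d : String) (k : Nat) : Bool :=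
  (PySem.List.pyRange (↑(16*k)) (↑(16*k+16)) 1).any
    (fun pos => decide (PySem.Str.pyGet? o pos ≠ PySem.Str.pyGet? d pos))

-- "block k differs", at the granularity A compares
def pvBlockDiff (o d : String) (k : Nat) : Bool :=
  decide (¬ ((o.toList.drop (16*k)).take 16 = (d.toList.drop (16*k)).take 16))

lemma pv_floordiv_natCast (m : Nat) : PySem.Int.floordiv (↑m) 16 = ↑(m / 16) := by
  rw [PySem.Int.floordiv_eq_iff_of_pos (by norm_num)]
  constructor
  · exact_mod_cast Nat.div_mul_le_self m 16
  · have h : m < (m / 16 + 1) * 16 := by omega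
    exact_mod_cast h

lemma pv_foldl_add_ite (P : Int → Bool) (e : Int) : ∀ (l : List Int) (s : PySem.Set Int),
    l.foldl (fun s p => if P p then PySem.Set.add s e else s) s
      = if l.any P then PySem.Set.add s e else s := by
  intro l
  induction l with
  | nil => intro s; simp
  | cons hd tl ih =>
    intro s
    rw [List.foldl_cons, List.any_cons]
    by_cases h : P hd
    · rw [if_pos h, ih, h, Bool.true_or, if_pos rfl]
      split_ifs with h2
      · exact PySem.Set.add_of_mem ((PySem.Set.mem_add s e e).mpr (Or.inr rfl))
      · rfl
    · rw [if_neg h, ih]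
      simp [h]

lemma pv_block_scan (o d : String) (k : Nat) (s : PySem.Set Int) :
    (PySem.List.pyRange (↑(16*k)) (↑(16*k+16)) 1).foldl (pvStep o d) s
      = if pvBlockAny o d k then PySem.Set.add s ↑k else s := by
  have hcongr : (PySem.List.pyRange (↑(16*k)) (↑(16*k+16)) 1).foldl (pvStep o d) s
      = (PySem.List.pyRange (↑(16*k)) (↑(16*k+16)) 1).foldl
          (fun s pos => if (decide (PySem.Str.pyGet? o pos ≠ PySem.Str.pyGet? d pos)) then PySem.Set.add s (↑k : Int) else s) s := by
    apply PySem.List.foldl_congr_mem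
    intro acc pos hpos
    rw [PySem.List.mem_pyRange_one] at hpos
    have hq : PySem.Int.floordiv pos 16 = ↑k := by
      rw [PySem.Int.floordiv_eq_iff_of_pos (by norm_num)]
      push_cast at hpos ⊢
      omega
    simp only [pvStep]
    rw [hq]
    simp
  rw [hcongr, pv_foldl_add_ite, pvBlockAny]

lemma pv_scan_all (o d : String) : ∀ (N : Nat),
    (PySem.List.pyRange 0 (↑(16*N)) 1).foldl (pvStep o d) PySem.Set.empty
      = ((List.range N).filter (pvBlockAny o d)).map (Nat.cast : Nat → Int) := by
  intro N
  induction N with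
  | zero =>
    rw [show ((16*0 : Nat) : Int) = 0 by norm_num, PySem.List.pyRange_one_eq_nil le_rfl]
    simp
  | succ N ih =>
    have hsplit : PySem.List.pyRange 0 (↑(16*(N+1))) 1
        = PySem.List.pyRange 0 (↑(16*N)) 1 ++ PySem.List.pyRange (↑(16*N)) (↑(16*N+16)) 1 := by
      have h : ((16*(N+1) : Nat) : Int) = ((16*N+16 : Nat) : Int) := by push_cast; ring
      rw [h]
      exact PySem.List.pyRange_one_append 0 _ _ (by positivity) (by push_cast; omega)
    rw [hsplit, List.foldl_append, ih, pv_block_scan]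
    have hnotmem : (↑N : Int) ∉ ((List.range N).filter (pvBlockAny o d)).map (Nat.cast : Nat → Int) := by
      intro hmem
      obtain ⟨j, hj, hcast⟩ := List.mem_map.mp hmem
      have := List.mem_range.mp (List.mem_filter.mp hj).1
      omega
    by_cases h : pvBlockAny o d N
    · rw [if_pos h, PySem.Set.add_of_not_mem hnotmem, List.range_succ, List.filter_append,
        List.map_append]
      congr 1
      simp [h]
    · rw [if_neg h, List.range_succ, List.filter_append, List.map_append]
      simp [h]

lemma pv_take_eq_iff (O D : List Char) (k : Nat)
    (h1 : 16*k+16 ≤ O.length) (h2 : 16*k+16 ≤ D.length) :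
    ((O.drop (16*k)).take 16 = (D.drop (16*k)).take 16)
      ↔ ∀ j, j < 16 → O[16*k+j]? = D[16*k+j]? := by
  constructor
  · intro h j hj
    have := congrArg (fun l => l[j]?) h
    simpa [List.getElem?_take, hj, List.getElem?_drop] using this
  · intro h
    apply List.ext_getElem?
    intro i
    by_cases hi : i < 16
    · simpa [List.getElem?_take, hi, List.getElem?_drop] using h i hi
    · rw [List.getElem?_eq_none, List.getElem?_eq_none]
      · simp only [List.length_take, List.length_drop]; omega
      · simp only [List.length_take, List.length_drop]; omega

-- the two granularities agree on full blocks
lemma pv_blockAny_eq (o d : String) (k : Nat)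
    (h1 : 16*k+16 ≤ o.toList.length) (h2 : 16*k+16 ≤ d.toList.length) :
    pvBlockAny o d k = pvBlockDiff o d k := by
  unfold pvBlockAny pvBlockDiff
  rw [PySem.List.pyRange_one]
  have hn : (((16*k+16 : Nat) : Int) - ((16*k : Nat) : Int)).toNat = 16 := by omega
  rw [hn, List.any_map]
  rw [Bool.eq_iff_iff]
  simp only [List.any_eq_true, List.mem_range, decide_eq_true_eq, Function.comp]
  constructor
  · rintro ⟨j, hj, hne⟩ heq
    apply hne
    have hcast : ((16*k : Nat) : Int) + (j : Int) = ((16*k+j : Nat) : Int) := by push_cast; ring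
    rw [hcast, PySem.Str.pyGet?_natCast, PySem.Str.pyGet?_natCast]
    exact (pv_take_eq_iff o.toList d.toList k h1 h2).mp heq j hj
  · intro hne
    by_contra hall
    push_neg at hall
    apply hne
    rw [pv_take_eq_iff o.toList d.toList k h1 h2]
    intro j hj
    have := hall j hj
    have hcast : ((16*k : Nat) : Int) + (j : Int) = ((16*k+j : Nat) : Int) := by push_cast; ring
    rw [hcast, PySem.Str.pyGet?_natCast, PySem.Str.pyGet?_natCast] at this
    exact this

lemma pv_slice_block (s : String) (k : Nat) :
    (PySem.Str.slice s (some ((k:Int)*16)) (some ((k:Int)*16+16))).toList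
      = (s.toList.drop (16*k)).take 16 := by
  rw [PySem.Str.toList_slice]
  have h1 : ((k:Int)*16) = ((16*k : Nat) : Int) := by push_cast; ring
  have h2 : ((k:Int)*16+16) = ((16*k : Nat) : Int) + ((16:Nat) : Int) := by push_cast; ring
  rw [h2, h1]
  exact PySem.List.slice_natCast_add s.toList (16*k) 16

lemma pv_min_cast (o d : String) :
    min (PySem.Str.len o) (PySem.Str.len d) = ((min o.toList.length d.toList.length : Nat) : Int) := by
  simp [PySem.Str.len_eq, Nat.cast_min]

lemma pv_A_eq (o d : String) :
    count_damaged_blocks o d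
      = ↑((List.range ((min o.toList.length d.toList.length) / 16)).countP (pvBlockDiff o d)) := by
  simp only [count_damaged_blocks]
  rw [pv_min_cast, pv_floordiv_natCast, PySem.List.pyRange_one]
  simp only [sub_zero, Int.toNat_natCast, zero_add]
  rw [List.foldl_map]
  have hcongr : ∀ (acc : Int), ∀ k ∈ List.range ((min o.toList.length d.toList.length) / 16),
      (fun acc (k : Nat) =>
        if PySem.Str.slice o (some ((k:Int)*16)) (some ((k:Int)*16+16))
            ≠ PySem.Str.slice d (some ((k:Int)*16)) (some ((k:Int)*16+16))
        then acc + 1 else acc) acc k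
      = (fun acc k => if pvBlockDiff o d k then acc + 1 else acc) acc k := by
    intro acc k _
    apply if_congr _ rfl rfl
    simp only [pvBlockDiff, ne_eq, decide_eq_true_eq]
    rw [String.ext_iff, pv_slice_block, pv_slice_block]
  rw [PySem.List.foldl_congr_mem _ _ _ _ hcongr, PySem.List.foldl_count_if]
  simp

lemma pv_B_eq (o d : String) :
    count_damaged_blocks_alt o d
      = ↑((List.range ((min o.toList.length d.toList.length) / 16)).countP (pvBlockAny o d)) := by
  simp only [count_damaged_blocks_alt]
  rw [pv_min_cast, pv_floordiv_natCast]
  have hlim : ((min o.toList.length d.toList.length / 16 : Nat) : Int) * 16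
      = ((16 * (min o.toList.length d.toList.length / 16) : Nat) : Int) := by push_cast; ring
  rw [hlim]
  have hstep : (fun (s : PySem.Set Int) pos =>
      if PySem.Str.pyGet? o pos ≠ PySem.Str.pyGet? d pos
      then PySem.Set.add s (PySem.Int.floordiv pos 16) else s) = pvStep o d := rfl
  rw [hstep, pv_scan_all]
  rw [List.countP_eq_length_filter]
  simp [PySem.Set.len]

-- ===== VERDICT (by name: the statement is the Claim_ definition above) =====
theorem count_damaged_blocks_spec : Claim_equal_count_damaged_blocks := by
  intro o d _
  show count_damaged_blocks o d = count_damaged_blocks_alt o d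
  rw [pv_A_eq, pv_B_eq]
  congr 1
  apply List.countP_congr
  intro k hk
  rw [List.mem_range] at hk
  have hmo := Nat.min_le_left o.toList.length d.toList.length
  have hmd := Nat.min_le_right o.toList.length d.toList.length
  have h1 : 16*k+16 ≤ o.toList.length := by omega
  have h2 : 16*k+16 ≤ d.toList.length := by omega
  rw [pv_blockAny_eq o d k h1 h2]
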